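-- pv_equiv track=rewrite | github.com/mohamednaleem/cmems | python/largest_even_number_2.py | largest_even_number
-- ===== SOURCE A (Python) =====
-- def largest_even_number(s):
--     # Extract digits from the string and remove duplicates
--     digits = set([char for char in s if char.isdigit()])
--
--     # Filter out even digits
--     even_digits = [int(digit) for digit in digits if int(digit) % 2 == 0]
--
--     # If no even digits are found, return -1
--     if not even_digits:
--         return -1
--
--     # Sort the digits in descending order to form the largest number
--     even_digits.sort(reverse=True)
--
--     # Join the digits to form the largest even number
--     largest_even = ''.join(map(str, even_digits))
--
--     return int(largest_even)
-- ===== SOURCE B (Python) =====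
-- def largest_even_number(s):
--     # Single pass over the even digits in descending order; dedup and order are built in.
--     result = ""
--     for d in "86420":
--         if d in s:
--             result += d
--     return int(result) if result else -1
-- ===== Notes on version B (the rewrite author's own statement) =====
-- stated objective: simpler
-- what changed: Replaces A's collect-set/filter/int-convert/sort/join pipeline by a single pass over the fixed candidate string '86420', appending each even digit found in s, so dedup and descending order are built in.
import Mathlib
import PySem

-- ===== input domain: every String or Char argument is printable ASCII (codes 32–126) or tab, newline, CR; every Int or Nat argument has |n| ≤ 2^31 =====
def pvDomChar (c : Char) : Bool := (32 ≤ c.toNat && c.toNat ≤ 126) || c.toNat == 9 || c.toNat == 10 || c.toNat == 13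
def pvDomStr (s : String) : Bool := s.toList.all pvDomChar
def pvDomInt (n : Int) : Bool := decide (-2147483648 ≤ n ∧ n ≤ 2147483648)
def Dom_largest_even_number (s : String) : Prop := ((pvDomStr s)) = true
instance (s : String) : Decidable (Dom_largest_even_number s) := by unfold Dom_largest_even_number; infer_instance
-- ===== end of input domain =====

-- B replaces A's set/filter/sort/join pipeline by one pass over the fixed string "86420" (simpler).

-- ===== PORT A =====
-- int(digit) for a one-character digit string; ofChars? is some on every digit char, so getD 0 is never used
def pvDigitInt (c : Char) : Int := (PySem.Int.ofChars? [c]).getD 0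

-- The Python comprehension iterates the SET 'digits' (hash order); it is ported in the set's
-- insertion order — exact here because the list is immediately tested for emptiness and sorted by
-- its distinct values, so the returned value does not depend on the iteration order.
def largest_even_number (s : String) : Int :=
  let digits : PySem.Set Char :=
    PySem.Set.ofList (s.toList.filter (fun c => PySem.Chars.isdigit c))
  let even_digits : List Int :=
    (digits.filter (fun c => PySem.Int.mod (pvDigitInt c) 2 == 0)).map (fun c => pvDigitInt c)
  if even_digits = [] then -1
  else
    let sortedDigits := PySem.List.sorted even_digits (fun x => x) true
    let largest_even := PySem.Chars.join [] (sortedDigits.map (fun n => PySem.Int.toChars n))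
    (PySem.Int.ofChars? largest_even).getD 0  -- int(largest_even); never none: nonempty digit string

-- ===== PORT B =====
def largest_even_number_alt (s : String) : Int :=
  let result : List Char := "86420".toList.foldl
    (fun acc d => if PySem.Chars.isIn [d] s.toList then acc ++ [d] else acc) []
  if result = [] then -1
  else (PySem.Int.ofChars? result).getD 0  -- int(result); never none: nonempty digit string

-- ===== PRECONDITION & SPEC =====
def Spec_largest_even_number (s : String) (out : Int) : Prop := out = largest_even_number_alt s
instance (s : String) (out : Int) : Decidable (Spec_largest_even_number s out) := by unfold Spec_largest_even_number; infer_instance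

-- ===== CLAIM (what is proved, stated in full; the proofs are below) =====
def Claim_equal_largest_even_number : Prop := ∀ (s : String), Dom_largest_even_number s → Spec_largest_even_number s (largest_even_number s)

-- ===== LEMMAS AND PROOFS =====

-- the ten ASCII digit chars (proof-side helper)
def pvDigits : List Char := ['0','1','2','3','4','5','6','7','8','9']
-- the even digit chars in descending order (proof-side helper)
def pvEvens : List Char := ['8','6','4','2','0']

lemma pv_isdigit_mem (c : Char) (h : PySem.Chars.isdigit c = true) : c ∈ pvDigits := by
  simp only [PySem.Chars.isdigit, Bool.and_eq_true, decide_eq_true_eq] at h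
  obtain ⟨h1, h2⟩ := h
  have hv1 : 48 ≤ c.toNat := h1
  have hv2 : c.toNat ≤ 57 := h2
  have : c.toNat = 48 ∨ c.toNat = 49 ∨ c.toNat = 50 ∨ c.toNat = 51 ∨ c.toNat = 52 ∨
      c.toNat = 53 ∨ c.toNat = 54 ∨ c.toNat = 55 ∨ c.toNat = 56 ∨ c.toNat = 57 := by omega
  have hc : ∀ n, c.toNat = n → c = Char.ofNat n := by
    intro n hn; subst hn; exact (Char.ofNat_toNat c).symm
  rcases this with h | h | h | h | h | h | h | h | h | h <;>
    simp [pvDigits, hc _ h]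

set_option maxRecDepth 8192 in
lemma pv_digit_inj : ∀ x ∈ pvDigits, ∀ y ∈ pvDigits, pvDigitInt x = pvDigitInt y → x = y := by
  intro x hx y hy; fin_cases hx <;> fin_cases hy <;> decide

set_option maxRecDepth 8192 in
lemma pv_even_mem (c : Char) (hc : c ∈ pvDigits)
    (he : (PySem.Int.mod (pvDigitInt c) 2 == 0) = true) : c ∈ pvEvens := by
  fin_cases hc <;> revert he <;> decide

set_option maxRecDepth 8192 in
lemma pv_evens_isdigit : ∀ d ∈ pvEvens, PySem.Chars.isdigit d = true := by
  intro d hd; fin_cases hd <;> rfl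

set_option maxRecDepth 8192 in
lemma pv_evens_even : ∀ d ∈ pvEvens, (PySem.Int.mod (pvDigitInt d) 2 == 0) = true := by
  intro d hd; fin_cases hd <;> rfl

set_option maxRecDepth 8192 in
lemma pv_evens_toChars : ∀ d ∈ pvEvens, PySem.Int.toChars (pvDigitInt d) = [d] := by
  intro d hd; fin_cases hd <;> rfl

set_option maxRecDepth 8192 in
lemma pv_evens_pairwise : List.Pairwise (fun a b => pvDigitInt b < pvDigitInt a) pvEvens := by decide

-- A's sorted even-digit list is exactly B's descending scan, mapped to ints
lemma pv_sorted_eq (l : List Char) :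
    PySem.List.sorted
      (((PySem.Set.ofList (l.filter (fun c => PySem.Chars.isdigit c))).filter
          (fun c => PySem.Int.mod (pvDigitInt c) 2 == 0)).map (fun c => pvDigitInt c))
      (fun x => x) true
      = (pvEvens.filter (fun d => decide (d ∈ l))).map (fun c => pvDigitInt c) := by
  set D := (PySem.Set.ofList (l.filter (fun c => PySem.Chars.isdigit c))).filter
      (fun c => PySem.Int.mod (pvDigitInt c) 2 == 0) with hD
  set cs := pvEvens.filter (fun d => decide (d ∈ l)) with hcs
  have hcs_sub : ∀ x ∈ cs, x ∈ pvEvens := fun x hx => List.mem_of_mem_filter hx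
  have hD_digit : ∀ c ∈ D, c ∈ pvDigits := by
    intro c hc
    rw [hD, List.mem_filter] at hc
    have := (PySem.Set.mem_ofList _ _).mp hc.1
    exact pv_isdigit_mem c (List.mem_filter.mp this).2
  have hpw : List.Pairwise (fun a b : Int => b < a) (cs.map (fun c => pvDigitInt c)) := by
    rw [List.pairwise_map]
    exact List.Pairwise.filter _ pv_evens_pairwise
  apply PySem.List.sorted_rev_eq_of_perm_of_pairwise_gt
  · -- permutation: same (distinct) elements
    rw [List.perm_ext_iff_of_nodup]
    · intro x
      simp only [List.mem_map, hcs, List.mem_filter, hD, decide_eq_true_eq]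
      constructor
      · rintro ⟨d, ⟨hdE, hdl⟩, rfl⟩
        refine ⟨d, ⟨(PySem.Set.mem_ofList _ _).mpr ?_, pv_evens_even d hdE⟩, rfl⟩
        exact List.mem_filter.mpr ⟨hdl, pv_evens_isdigit d hdE⟩
      · rintro ⟨c, ⟨hcD, hce⟩, rfl⟩
        have hcl := (List.mem_filter.mp ((PySem.Set.mem_ofList _ _).mp hcD)).1
        have hcdig := pv_isdigit_mem c (List.mem_filter.mp ((PySem.Set.mem_ofList _ _).mp hcD)).2
        exact ⟨c, ⟨pv_even_mem c hcdig hce, hcl⟩, rfl⟩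
    · -- nodup of the mapped descending scan: strictly decreasing
      exact hpw.imp (fun h => ne_of_gt h)
    · -- nodup of A's list: the set is nodup and pvDigitInt is injective on digit chars
      apply List.Nodup.map_on
      · intro x hx y hy
        exact pv_digit_inj x (hD_digit x hx) y (hD_digit y hy)
      · exact (PySem.Set.nodup_ofList _).filter _
  · exact hpw

-- ===== VERDICT (by name: the statement is the Claim_ definition above) =====
theorem largest_even_number_spec : Claim_equal_largest_even_number := by
  intro s _hd
  unfold Spec_largest_even_number largest_even_number largest_even_number_alt
  have h86420 : "86420".toList = pvEvens := by decide
  -- B's loop is a filter of the fixed candidate list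
  have hres : "86420".toList.foldl
      (fun acc d => if PySem.Chars.isIn [d] s.toList then acc ++ [d] else acc) []
      = pvEvens.filter (fun d => decide (d ∈ s.toList)) := by
    rw [h86420, PySem.List.foldl_append_if_eq_filter]
    simp only [List.nil_append]
    apply List.filter_congr
    intro d _
    rw [Bool.eq_iff_iff, PySem.Chars.isIn_iff_infix, List.singleton_infix_iff, decide_eq_true_eq]
  -- the two emptiness tests agree
  have hempty : (((PySem.Set.ofList (s.toList.filter (fun c => PySem.Chars.isdigit c))).filter
      (fun c => PySem.Int.mod (pvDigitInt c) 2 == 0)).map (fun c => pvDigitInt c) = [])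
      ↔ pvEvens.filter (fun d => decide (d ∈ s.toList)) = [] := by
    constructor
    · intro h
      have h2 := pv_sorted_eq s.toList
      rw [h] at h2
      have := h2.symm
      simp only [PySem.List.sorted] at this
      simpa using this
    · intro h
      have hperm := PySem.List.sorted_perm
        (((PySem.Set.ofList (s.toList.filter (fun c => PySem.Chars.isdigit c))).filter
          (fun c => PySem.Int.mod (pvDigitInt c) 2 == 0)).map (fun c => pvDigitInt c))
        (fun x => x) true
      rw [pv_sorted_eq s.toList, h] at hperm
      exact hperm.symm.eq_nil
  -- the joined digit string is exactly B's result string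
  have hjoin : PySem.Chars.join []
      (((pvEvens.filter (fun d => decide (d ∈ s.toList))).map (fun c => pvDigitInt c)).map
        (fun n => PySem.Int.toChars n)) = pvEvens.filter (fun d => decide (d ∈ s.toList)) := by
    rw [List.map_map]
    have h2 : (pvEvens.filter (fun d => decide (d ∈ s.toList))).map
        ((fun n => PySem.Int.toChars n) ∘ fun c => pvDigitInt c)
        = (pvEvens.filter (fun d => decide (d ∈ s.toList))).map (fun c => [c]) := by
      apply List.map_congr_left
      intro d hd
      exact pv_evens_toChars d (List.mem_of_mem_filter hd)
    rw [h2, PySem.Chars.join_nil_singletons]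
  simp only [hres, pv_sorted_eq s.toList]
  by_cases hnil : pvEvens.filter (fun d => decide (d ∈ s.toList)) = []
  · rw [if_pos (hempty.mpr hnil), if_pos hnil]
  · rw [if_neg (fun h => hnil (hempty.mp h)), if_neg hnil, hjoin]
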